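-- pv_equiv track=rewrite | github.com/signalbash/borf | borf/get_orfs.py | unique_number_from_list
-- ===== SOURCE A (Python) =====
-- def unique_number_from_list(input_list):
--     """
--     Produce a list of integers corresponding to the number of times an
--     element in the input list has been observed.
--
--     Parameters
--     ----------
--     input_list : list
--         list of values
--
--     Returns
--     -------
--     occurrence : list
--         integer list
--
--     Examples
--     --------
--
--     unique_number_from_list(['a','a','b','c','c','c'])
--     unique_number_from_list(['a','b','c'])
--
--     """
--     dups = {}
--     occurrence = []
--     for i, val in enumerate(input_list):
--         if val not in dups:
--             # Store index of first occurrence and occurrence value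
--             dups[val] = [i, 1]
--
--         # Increment occurrence value,
--         else:
--             dups[val][1] += 1
--             # Use stored occurrence value
--         occurrence.append(dups[val][1])
--     return occurrence
-- ===== SOURCE B (Python) =====
-- def unique_number_from_list(input_list):
--     # Pass 1: group the positions at which each value occurs.
--     positions = {}
--     for i, val in enumerate(input_list):
--         positions.setdefault(val, []).append(i)
--     # Pass 2: scatter ranks 1,2,3,... into the output by stored index.
--     occurrence = [0] * len(input_list)
--     for idxs in positions.values():
--         for rank, idx in enumerate(idxs, 1):
--             occurrence[idx] = rank
--     return occurrence
-- ===== Notes on version B (the rewrite author's own statement) =====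
-- stated objective: alternative
-- what changed: Replaces A's single increment-a-running-counter-as-you-append loop with a two-phase build-table-then-scatter: one pass groups the indices of each value into a positions dict, then a second pass writes rank 1,2,3,... of each occurrence directly into a preallocated output slot by index.
import Mathlib
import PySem

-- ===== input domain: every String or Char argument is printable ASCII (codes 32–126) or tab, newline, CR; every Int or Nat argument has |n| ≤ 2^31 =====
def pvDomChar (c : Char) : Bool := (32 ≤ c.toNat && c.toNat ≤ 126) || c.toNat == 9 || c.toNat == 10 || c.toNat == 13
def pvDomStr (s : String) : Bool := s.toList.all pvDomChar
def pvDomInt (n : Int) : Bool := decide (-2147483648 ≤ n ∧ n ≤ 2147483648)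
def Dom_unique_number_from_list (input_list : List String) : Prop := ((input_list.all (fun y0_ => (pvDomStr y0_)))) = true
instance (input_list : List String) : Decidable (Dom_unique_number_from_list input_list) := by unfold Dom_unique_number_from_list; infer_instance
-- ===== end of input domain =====

-- B groups the positions of each value in one pass and then scatters ranks 1,2,3,… into a preallocated
-- output by stored index — a build-table-then-scatter decomposition instead of A's running counter
-- appended as it goes; same return value, not measured faster.

-- ===== PORT A =====
def unique_number_from_list (input_list : List String) : List Int :=
  ((PySem.List.enumerate input_list).foldl
    (fun (st : PySem.Dict String (Int × Int) × List Int) p =>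
      let dups :=
        if !(st.1.contains p.2) then st.1.insert p.2 (p.1, 1)
        else st.1.modify p.2 (0, 0) (fun q => (q.1, q.2 + 1))
      (dups, st.2 ++ [(dups.getD p.2 (0, 0)).2]))
    (PySem.Dict.empty, [])).2

-- ===== PORT B =====
def unique_number_from_list_alt (input_list : List String) : List Int :=
  let positions :=
    (PySem.List.enumerate input_list).foldl
      (fun d (p : Int × String) => d.modify p.2 [] (fun l => l ++ [p.1])) PySem.Dict.empty
  let occurrence0 := List.replicate input_list.length (0 : Int)
  positions.values.foldl
    (fun occurrence idxs =>
      (PySem.List.enumerate idxs 1).foldl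
        (fun occurrence (p : Int × Int) => PySem.List.pySetD occurrence p.2 p.1) occurrence)
    occurrence0

-- ===== PRECONDITION & SPEC =====
def Spec_unique_number_from_list (input_list : List String) (out : List Int) : Prop := out = unique_number_from_list_alt input_list
instance (input_list : List String) (out : List Int) : Decidable (Spec_unique_number_from_list input_list out) := by unfold Spec_unique_number_from_list; infer_instance

-- ===== CLAIM (what is proved, stated in full; the proofs are below) =====
def Claim_equal_unique_number_from_list : Prop := ∀ (input_list : List String), Dom_unique_number_from_list input_list → Spec_unique_number_from_list input_list (unique_number_from_list input_list)

-- ===== LEMMAS AND PROOFS =====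

def pvCanon (l : List String) : List Int :=
  (List.range l.length).map (fun j => (((l.take (j + 1)).count (l.getD j "")) : Int))
def pvPosList (l : List String) (v : String) : List Int :=
  ((PySem.List.enumerate l).filter (fun p => p.2 == v)).map (·.1)

lemma pvCanon_append (l : List String) (x : String) :
    pvCanon (l ++ [x]) = pvCanon l ++ [((l.count x : Int) + 1)] := by
  unfold pvCanon
  rw [List.length_append, List.length_singleton, List.range_succ, List.map_append]
  congr 1
  · apply List.map_congr_left
    intro j hj
    rw [List.mem_range] at hj
    rw [List.take_append_of_le_length (by omega), List.getD_append _ _ _ _ hj]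
  · simp [List.take_of_length_le, List.count_append]

lemma pvPosList_append (l : List String) (x : String) (v : String) :
    pvPosList (l ++ [x]) v =
    pvPosList l v ++ (if x = v then [(l.length : Int)] else []) := by
  unfold pvPosList
  rw [PySem.List.enumerate_append, List.filter_append, List.map_append]
  congr 1
  simp [PySem.List.enumerate]
  split_ifs <;> simp_all

lemma pvPosList_bounds (l : List String) (v : String) :
    ∀ i ∈ pvPosList l v, 0 ≤ i ∧ i < (l.length : Int) := by
  induction l using List.reverseRecOn with
  | nil => simp [pvPosList, PySem.List.enumerate]
  | append_singleton l x ih =>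
    intro i hi
    rw [pvPosList_append] at hi
    rcases List.mem_append.1 hi with h | h
    · have := ih i h; simp; omega
    · split_ifs at h <;> simp_all

lemma pvPosList_nodup (l : List String) (v : String) : (pvPosList l v).Nodup := by
  induction l using List.reverseRecOn with
  | nil => simp [pvPosList, PySem.List.enumerate]
  | append_singleton l x ih =>
    rw [pvPosList_append]
    split_ifs with h
    · refine List.Nodup.append ih (List.nodup_singleton _) ?_
      intro i hi hmem
      have := pvPosList_bounds l v i hi
      simp at hmem; omega
    · simpa using ih

lemma pvPosList_length (l : List String) (v : String) :
    (pvPosList l v).length = l.count v := by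
  induction l using List.reverseRecOn with
  | nil => simp [pvPosList, PySem.List.enumerate]
  | append_singleton l x ih =>
    rw [pvPosList_append, List.length_append, ih, List.count_append]
    split_ifs with h <;> simp [h]
  
lemma pvPosList_mem (l : List String) (v : String) (j : Nat) :
    ((j : Int) ∈ pvPosList l v) ↔ (j < l.length ∧ l.getD j "" = v) := by
  induction l using List.reverseRecOn with
  | nil => simp [pvPosList, PySem.List.enumerate]
  | append_singleton l x ih =>
    rw [pvPosList_append, List.mem_append, ih]
    constructor
    · rintro (⟨hj, hv⟩ | h)
      · exact ⟨by simp; omega, by rw [List.getD_append _ _ _ _ hj]; exact hv⟩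
      · split_ifs at h with hx
        · simp at h
          subst h
          exact ⟨by simp, by rw [List.getD_append_right _ _ _ _ (le_refl _)]; simpa using hx⟩
        · simp at h
    · rintro ⟨hj, hv⟩
      simp at hj
      rcases Nat.lt_or_ge j l.length with hlt | hge
      · left
        exact ⟨hlt, by rwa [List.getD_append _ _ _ _ hlt] at hv⟩
      · right
        have hje : j = l.length := by omega
        subst hje
        rw [List.getD_append_right _ _ _ _ (le_refl _)] at hv
        simp at hv
        simp [hv]

lemma pvPosList_idxOf (l : List String) (v : String) (j : Nat)
    (hj : j < l.length) (hv : l.getD j "" = v) :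
    (pvPosList l v).idxOf (j : Int) = (l.take j).count v := by
  induction l using List.reverseRecOn with
  | nil => simp at hj
  | append_singleton l x ih =>
    rw [pvPosList_append, List.idxOf_append]
    rcases Nat.lt_or_ge j l.length with hlt | hge
    · have hv' : l.getD j "" = v := by rwa [List.getD_append _ _ _ _ hlt] at hv
      have hmem : (j:Int) ∈ pvPosList l v := (pvPosList_mem l v j).2 ⟨hlt, hv'⟩
      rw [if_pos hmem, ih hlt hv', List.take_append_of_le_length (by omega)]
    · have hje : j = l.length := by simp at hj; omega
      have hv' : x = v := by
        rw [hje, List.getD_append_right _ _ _ _ (le_refl _)] at hv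
        simpa using hv
      have hnmem : (j:Int) ∉ pvPosList l v := by
        intro h
        exact absurd ((pvPosList_mem l v j).1 h).1 (by omega)
      rw [if_neg hnmem, if_pos hv', pvPosList_length, hje]
      simp [List.take_append_of_le_length (le_refl l.length)]

def pvScatter (out : List Int) (g : List Int) : List Int :=
  (PySem.List.enumerate g 1).foldl
    (fun occurrence (p : Int × Int) => PySem.List.pySetD occurrence p.2 p.1) out

lemma pvSet_fold_length (ps : List (Int × Int)) (out : List Int) :
    (ps.foldl (fun o (p : Int × Int) => PySem.List.pySetD o p.2 p.1) out).length = out.length := by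
  induction ps generalizing out with
  | nil => rfl
  | cons p ps ih => simp [List.foldl_cons, ih, PySem.List.length_pySetD]

lemma pvScatter_length (out : List Int) (g : List Int) :
    (pvScatter out g).length = out.length := pvSet_fold_length _ _

lemma pvScatter_append (out : List Int) (g : List Int) (i : Int) :
    pvScatter out (g ++ [i]) =
    PySem.List.pySetD (pvScatter out g) i (1 + g.length) := by
  unfold pvScatter
  rw [PySem.List.enumerate_append, List.foldl_append]
  simp [PySem.List.enumerate]

lemma pvScatter_getElem? (g : List Int) (out : List Int)
    (hnd : g.Nodup) (hpos : ∀ i ∈ g, 0 ≤ i) (j : Nat) (hj : j < out.length) :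
    (pvScatter out g)[j]? =
    if (j : Int) ∈ g then some ((g.idxOf (j : Int) : Int) + 1) else out[j]? := by
  induction g using List.reverseRecOn with
  | nil => simp [pvScatter, PySem.List.enumerate]
  | append_singleton g i ih =>
    have hnd' : g.Nodup := hnd.of_append_left
    have hpos' : ∀ x ∈ g, 0 ≤ x := fun x hx => hpos x (List.mem_append_left _ hx)
    have hi0 : 0 ≤ i := hpos i (by simp)
    have hig : i ∉ g := fun h => (List.disjoint_of_nodup_append hnd) h (by simp)
    rw [pvScatter_append, PySem.List.pySetD_of_nonneg _ _ hi0, List.getElem?_set]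
    by_cases hji : (j : Int) = i
    · have htn : i.toNat = j := by omega
      rw [if_pos htn, if_pos (by rw [pvScatter_length]; omega)]
      rw [if_pos (List.mem_append_right _ (by simp [hji]))]
      rw [List.idxOf_append, if_neg (by rw [hji]; exact hig)]
      simp [← hji]
      ring
    · have htn : i.toNat ≠ j := by omega
      rw [if_neg htn, ih hnd' hpos']
      have hmem : ((j : Int) ∈ g ++ [i]) ↔ ((j : Int) ∈ g) := by simp [hji]
      by_cases hjg : (j : Int) ∈ g
      · rw [if_pos hjg, if_pos (hmem.2 hjg), List.idxOf_append, if_pos hjg]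
      · rw [if_neg hjg, if_neg (fun h => hjg (hmem.1 h))]

lemma pvScatter_fold (l : List String) (vs : List String)
    (out : List Int) (hlen : out.length = l.length) (j : Nat) (hj : j < l.length) :
    (vs.foldl (fun o v => pvScatter o (pvPosList l v)) out)[j]? =
    if l.getD j "" ∈ vs
    then some (((pvPosList l (l.getD j "")).idxOf (j : Int) : Int) + 1)
    else out[j]? := by
  induction vs generalizing out with
  | nil => simp
  | cons v vs ih =>
    rw [List.foldl_cons]
    have hlen1 : (pvScatter out (pvPosList l v)).length = l.length := by
      rw [pvScatter_length]; exact hlen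
    rw [ih _ hlen1]
    have hout1 := pvScatter_getElem? (pvPosList l v) out (pvPosList_nodup l v)
      (fun i hi => (pvPosList_bounds l v i hi).1) j (by omega)
    by_cases hmem : l.getD j "" ∈ vs
    · rw [if_pos hmem, if_pos (List.mem_cons_of_mem _ hmem)]
    · rw [if_neg hmem, hout1]
      by_cases hveq : l.getD j "" = v
      · rw [if_pos ((pvPosList_mem l v j).2 ⟨hj, hveq⟩),
          if_pos (show l.getD j "" ∈ v :: vs by rw [hveq]; exact List.mem_cons_self), hveq]
      · have h1 : (j : Int) ∉ pvPosList l v := fun h => hveq ((pvPosList_mem l v j).1 h).2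
        have h2 : l.getD j "" ∉ v :: vs := by
          intro h
          rcases List.mem_cons.1 h with h | h
          · exact hveq h
          · exact hmem h
        rw [if_neg h1, if_neg h2]

def pvPosDict (l : List String) : PySem.Dict String (List Int) :=
  (PySem.List.enumerate l).foldl
    (fun d (p : Int × String) => d.modify p.2 [] (fun lst => lst ++ [p.1])) PySem.Dict.empty

lemma pvPosDict_append (l : List String) (x : String) :
    pvPosDict (l ++ [x]) =
    (pvPosDict l).modify x [] (fun lst => lst ++ [(l.length : Int)]) := by
  unfold pvPosDict
  rw [PySem.List.enumerate_append, List.foldl_append]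
  simp [PySem.List.enumerate]

lemma pvPosDict_getD (l : List String) (v : String) :
    (pvPosDict l).getD v [] = pvPosList l v := by
  induction l using List.reverseRecOn with
  | nil => simp [pvPosDict, pvPosList, PySem.List.enumerate]
  | append_singleton l x ih =>
    rw [pvPosDict_append, PySem.Dict.getD_modify, pvPosList_append]
    by_cases h : v = x
    · subst h
      rw [if_pos rfl, ih, if_pos rfl]
    · rw [if_neg h, ih, if_neg (fun hh => h hh.symm), List.append_nil]

lemma pvPosDict_keys (l : List String) : (pvPosDict l).keys = PySem.Set.ofList l := by
  unfold pvPosDict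
  rw [PySem.Dict.keys_foldl_modify_key (PySem.List.enumerate l) (fun p => p.2) []
    (fun _ p => (fun lst => lst ++ [p.1])) PySem.Dict.empty]
  rw [PySem.List.map_snd_enumerate]
  simp [PySem.Set.update_nil_left, PySem.Dict.keys_empty]



def pvAF (st : PySem.Dict String (Int × Int) × List Int) (p : Int × String) :
    PySem.Dict String (Int × Int) × List Int :=
  let dups :=
    if !(st.1.contains p.2) then st.1.insert p.2 (p.1, 1)
    else st.1.modify p.2 (0, 0) (fun q => (q.1, q.2 + 1))
  (dups, st.2 ++ [(dups.getD p.2 (0, 0)).2])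

lemma pvA_def (l : List String) :
    unique_number_from_list l =
    ((PySem.List.enumerate l).foldl pvAF (PySem.Dict.empty, [])).2 := rfl

lemma pvScatterFold_length (l : List String) (vs : List String) (out : List Int) :
    (vs.foldl (fun o v => pvScatter o (pvPosList l v)) out).length = out.length := by
  induction vs generalizing out with
  | nil => rfl
  | cons v vs ih => rw [List.foldl_cons, ih, pvScatter_length]

lemma pvB_eq_canon (l : List String) : unique_number_from_list_alt l = pvCanon l := by
  have hnk : (pvPosDict l).keys.Nodup := by
    rw [pvPosDict_keys]; exact PySem.Set.nodup_ofList l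
  have hvals : (pvPosDict l).values = (PySem.Set.ofList l).map (fun v => pvPosList l v) := by
    rw [PySem.Dict.values_eq_map_keys _ hnk [], pvPosDict_keys]
    exact List.map_congr_left (fun v _ => pvPosDict_getD l v)
  have halt : unique_number_from_list_alt l =
      ((pvPosDict l).values).foldl (fun o g => pvScatter o g) (List.replicate l.length (0 : Int)) := rfl
  rw [halt, hvals, List.foldl_map]
  apply List.ext_getElem?
  intro j
  by_cases hj : j < l.length
  · rw [pvScatter_fold l _ _ (by simp) j hj]
    have hgd : l.getD j "" = l[j] := List.getD_eq_getElem l "" hj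
    have hm : l.getD j "" ∈ PySem.Set.ofList l := by
      rw [PySem.Set.mem_ofList, hgd]; exact List.getElem_mem hj
    rw [if_pos hm, pvPosList_idxOf l _ j hj rfl]
    have hcan : (pvCanon l)[j]? = some (((l.take (j + 1)).count (l.getD j "") : Int)) := by
      unfold pvCanon
      simp [hj]
    rw [hcan]
    have htake : l.take (j + 1) = l.take j ++ [l[j]] := by
      rw [List.take_add_one]
      simp [List.getElem?_eq_getElem hj]
    rw [htake, List.count_append, hgd]
    simp
  · have h1 : (pvCanon l).length = l.length := by simp [pvCanon]
    rw [List.getElem?_eq_none (by rw [pvScatterFold_length]; simp; omega),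
      List.getElem?_eq_none (by omega)]

lemma pvA_invariant (l : List String) :
    ((PySem.List.enumerate l).foldl pvAF (PySem.Dict.empty, [])).2 = pvCanon l
  ∧ ∀ v : String,
      ((PySem.List.enumerate l).foldl pvAF (PySem.Dict.empty, [])).1.contains v = decide (v ∈ l)
    ∧ (((PySem.List.enumerate l).foldl pvAF (PySem.Dict.empty, [])).1.getD v (0, 0)).2 = (l.count v : Int) := by
  induction l using List.reverseRecOn with
  | nil =>
    refine ⟨by simp [PySem.List.enumerate, pvCanon], fun v => ⟨?_, ?_⟩⟩
    · simp [PySem.List.enumerate, PySem.Dict.contains_empty]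
    · simp [PySem.List.enumerate, PySem.Dict.getD_empty]
  | append_singleton l x ih =>
    obtain ⟨ih2, ihd⟩ := ih
    rw [PySem.List.enumerate_append]
    have hstep : ∀ st, (PySem.List.enumerate [x] (0 + l.length)).foldl pvAF st = pvAF st (l.length, x) := by
      intro st; simp [PySem.List.enumerate]
    rw [List.foldl_append, hstep]
    set st := (PySem.List.enumerate l).foldl pvAF (PySem.Dict.empty, []) with hst
    by_cases hx : x ∈ l
    · have hc : st.1.contains x = true := by rw [(ihd x).1]; simp [hx]
      have hdups : pvAF st ((l.length : Int), x) =
          (st.1.modify x (0, 0) (fun q => (q.1, q.2 + 1)),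
           st.2 ++ [((st.1.modify x (0, 0) (fun q => (q.1, q.2 + 1))).getD x (0, 0)).2]) := by
        unfold pvAF; rw [hc]; rfl
      rw [hdups]
      refine ⟨?_, fun v => ⟨?_, ?_⟩⟩
      · rw [ih2, pvCanon_append]
        simp [(ihd x).2]
      · rw [PySem.Dict.contains_modify]
        by_cases hvx : v = x
        · subst hvx; simp [hx]
        · simp [hvx, (ihd v).1]
      · by_cases hvx : v = x
        · subst hvx
          rw [PySem.Dict.getD_modify]
          simp [(ihd v).2, List.count_append]
        · have h0 : List.count v [x] = 0 := List.count_eq_zero.2 (by simp [hvx])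
          rw [PySem.Dict.getD_modify, if_neg hvx, (ihd v).2, List.count_append, h0, Nat.add_zero]
    · have hc : st.1.contains x = false := by rw [(ihd x).1]; simp [hx]
      have hdups : pvAF st ((l.length : Int), x) =
          (st.1.insert x ((l.length : Int), 1),
           st.2 ++ [((st.1.insert x ((l.length : Int), 1)).getD x (0, 0)).2]) := by
        unfold pvAF; rw [hc]; rfl
      rw [hdups]
      have hcount0 : l.count x = 0 := List.count_eq_zero.2 hx
      refine ⟨?_, fun v => ⟨?_, ?_⟩⟩
      · rw [ih2, pvCanon_append, hcount0]
        simp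
      · rw [PySem.Dict.contains_insert]
        by_cases hvx : v = x
        · subst hvx; simp
        · simp [hvx, (ihd v).1]
      · by_cases hvx : v = x
        · subst hvx
          rw [PySem.Dict.getD_insert]
          simp [List.count_append, hcount0]
        · have h0 : List.count v [x] = 0 := List.count_eq_zero.2 (by simp [hvx])
          rw [PySem.Dict.getD_insert, if_neg hvx, (ihd v).2, List.count_append, h0, Nat.add_zero]

lemma pvA_eq_canon (l : List String) : unique_number_from_list l = pvCanon l := by
  rw [pvA_def]; exact (pvA_invariant l).1

-- ===== VERDICT (by name: the statement is the Claim_ definition above) =====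
theorem unique_number_from_list_spec : Claim_equal_unique_number_from_list := by
  intro l _
  unfold Spec_unique_number_from_list
  rw [pvA_eq_canon, pvB_eq_canon]
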